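-- pv_equiv track=rewrite | github.com/iamaperson000/WCUE-fucker-deobfuscated | wcue-decompile/scripts/bulk_decode_v2.py | match_refs_to_seeds
-- ===== SOURCE A (Python) =====
-- def match_refs_to_seeds(hex_refs, seed_candidates, text, window=500):
--     """Match each hex I() reference to its nearest seed candidate."""
--     matches = {}
--
--     for h_index, hex_val, ref_pos in hex_refs:
--         best_seed = None
--         best_distance = window * 2  # Start beyond window
--         best_printable = -1
--
--         # Look in a window around the reference for seed candidates
--         for seed_val, seed_start, seed_end, seed_expr in seed_candidates:
--             # Check if seed is within window of this reference
--             if seed_start < ref_pos - window or seed_start > ref_pos + window: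
--                 continue
--
--             distance = abs(seed_start - ref_pos)
--             if distance > window:
--                 continue
--
--             if distance < best_distance:
--                 best_seed = seed_val
--                 best_distance = distance
--                 best_printable = -1  # Will need to verify
--
--         if best_seed is not None:
--             matches[h_index] = (best_seed, hex_val, best_distance)
--
--     return matches
-- ===== SOURCE B (Python) =====
-- def match_refs_to_seeds(hex_refs, seed_candidates, text, window=500):
--     """Match each hex I() reference to its nearest seed candidate."""
--     # Transposed traversal: sweep the seed list once, updating a per-reference
--     # state (best_seed, best_distance) for all references in parallel, then
--     # assemble the result dict in one final pass over the references.
--     states = [(None, window * 2) for _ in hex_refs]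
--     for seed_val, seed_start, seed_end, seed_expr in seed_candidates:
--         states = [
--             (seed_val, abs(seed_start - ref_pos))
--             if -window <= seed_start - ref_pos <= window
--                and abs(seed_start - ref_pos) < bd
--             else (bs, bd)
--             for (bs, bd), (_h, _v, ref_pos) in zip(states, hex_refs)
--         ]
--     matches = {}
--     for (h_index, hex_val, _ref_pos), (bs, bd) in zip(hex_refs, states):
--         if bs is not None:
--             matches[h_index] = (bs, hex_val, bd)
--     return matches
-- ===== Notes on version B (the rewrite author's own statement) =====
-- stated objective: alternative
-- what changed: B transposes the loop nest: instead of scanning all seed candidates once per reference, it sweeps the seed list a single time updating a per-reference (best_seed, best_distance) state list in parallel, then assembles the result dict in one final pass over the references.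
import Mathlib
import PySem

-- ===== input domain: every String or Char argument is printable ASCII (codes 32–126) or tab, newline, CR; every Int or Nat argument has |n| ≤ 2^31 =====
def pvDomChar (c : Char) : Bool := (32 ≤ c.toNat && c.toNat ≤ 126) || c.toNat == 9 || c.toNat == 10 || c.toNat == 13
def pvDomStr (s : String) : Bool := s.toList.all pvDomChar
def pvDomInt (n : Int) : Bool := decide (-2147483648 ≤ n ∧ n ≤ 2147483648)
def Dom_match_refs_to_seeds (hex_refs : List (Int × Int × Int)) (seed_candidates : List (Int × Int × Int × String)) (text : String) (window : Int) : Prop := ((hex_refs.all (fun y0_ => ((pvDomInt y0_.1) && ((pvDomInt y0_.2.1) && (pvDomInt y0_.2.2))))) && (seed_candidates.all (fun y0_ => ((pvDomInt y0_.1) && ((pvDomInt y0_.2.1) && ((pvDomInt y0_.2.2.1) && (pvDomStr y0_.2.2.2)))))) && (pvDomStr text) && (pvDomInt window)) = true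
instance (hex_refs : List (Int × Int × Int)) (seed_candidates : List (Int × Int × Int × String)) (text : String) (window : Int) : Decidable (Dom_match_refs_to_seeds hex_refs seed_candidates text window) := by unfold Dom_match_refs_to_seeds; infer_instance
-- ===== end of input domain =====

set_option maxHeartbeats 1000000

-- ===== PORT A =====
-- B transposes A's two loops (seeds outer, references updated in parallel); same return value, same cost (objective: alternative).
def match_refs_to_seeds (hex_refs : List (Int × Int × Int)) (seed_candidates : List (Int × Int × Int × String)) (text : String) (window : Int) : List (Int × Int × Int × Int) :=
  -- matches = {}; for h_index, hex_val, ref_pos in hex_refs: inner scan over seed_candidates;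
  -- inner state = (best_seed, best_distance, best_printable), initially (None, window*2, -1)
  (hex_refs.foldl
    (fun (ms : PySem.Dict Int (Int × Int × Int)) (hr : Int × Int × Int) =>
      match seed_candidates.foldl
          (fun (st : Option Int × Int × Int) (sc : Int × Int × Int × String) =>
            if sc.2.1 < hr.2.2 - window ∨ sc.2.1 > hr.2.2 + window then st
            else if |sc.2.1 - hr.2.2| > window then st
            else if |sc.2.1 - hr.2.2| < st.2.1 then (some sc.1, |sc.2.1 - hr.2.2|, -1)
            else st)
          (none, window * 2, -1) with
      | (some best_seed, best_distance, _) => ms.insert hr.1 (best_seed, hr.2.1, best_distance)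
      | (none, _, _) => ms)
    PySem.Dict.empty).items

-- ===== PORT B =====
def match_refs_to_seeds_alt (hex_refs : List (Int × Int × Int)) (seed_candidates : List (Int × Int × Int × String)) (text : String) (window : Int) : List (Int × Int × Int × Int) :=
  -- states = [(None, window*2) for _ in hex_refs]; one sweep over seed_candidates updates all states;
  -- then matches is assembled in one final pass over zip(hex_refs, states)
  ((hex_refs.zip
      (seed_candidates.foldl
        (fun (states : List (Option Int × Int)) (sc : Int × Int × Int × String) =>
          (states.zip hex_refs).map (fun p =>
            if (-window ≤ sc.2.1 - p.2.2.2 ∧ sc.2.1 - p.2.2.2 ≤ window) ∧ |sc.2.1 - p.2.2.2| < p.1.2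
            then (some sc.1, |sc.2.1 - p.2.2.2|)
            else (p.1.1, p.1.2)))
        (hex_refs.map (fun _ => (none, window * 2))))).foldl
      (fun (ms : PySem.Dict Int (Int × Int × Int)) p =>
        match p.2.1 with
        | some bs => ms.insert p.1.1 (bs, p.1.2.1, p.2.2)
        | none => ms)
    PySem.Dict.empty).items

-- ===== PRECONDITION & SPEC =====
def Spec_match_refs_to_seeds (hex_refs : List (Int × Int × Int)) (seed_candidates : List (Int × Int × Int × String)) (text : String) (window : Int) (out : List (Int × Int × Int × Int)) : Prop := out = match_refs_to_seeds_alt hex_refs seed_candidates text window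
instance (hex_refs : List (Int × Int × Int)) (seed_candidates : List (Int × Int × Int × String)) (text : String) (window : Int) (out : List (Int × Int × Int × Int)) : Decidable (Spec_match_refs_to_seeds hex_refs seed_candidates text window out) := by unfold Spec_match_refs_to_seeds; infer_instance

-- ===== CLAIM (what is proved, stated in full; the proofs are below) =====
def Claim_equal_match_refs_to_seeds : Prop := ∀ (hex_refs : List (Int × Int × Int)) (seed_candidates : List (Int × Int × Int × String)) (text : String) (window : Int), Dom_match_refs_to_seeds hex_refs seed_candidates text window → Spec_match_refs_to_seeds hex_refs seed_candidates text window (match_refs_to_seeds hex_refs seed_candidates text window)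

-- ===== LEMMAS AND PROOFS =====

-- Proof-only names for the two per-seed state updates (definitionally equal to the lambdas in the ports).
def pvStepA (window ref_pos : Int) (st : Option Int × Int × Int) (sc : Int × Int × Int × String) :
    Option Int × Int × Int :=
  if sc.2.1 < ref_pos - window ∨ sc.2.1 > ref_pos + window then st
  else if |sc.2.1 - ref_pos| > window then st
  else if |sc.2.1 - ref_pos| < st.2.1 then (some sc.1, |sc.2.1 - ref_pos|, -1)
  else st

def pvStepB (window ref_pos : Int) (p : Option Int × Int) (sc : Int × Int × Int × String) :
    Option Int × Int :=
  if (-window ≤ sc.2.1 - ref_pos ∧ sc.2.1 - ref_pos ≤ window) ∧ |sc.2.1 - ref_pos| < p.2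
  then (some sc.1, |sc.2.1 - ref_pos|)
  else (p.1, p.2)

-- zip with a mapped copy of the same list (both orientations), plumbing for the interchange.
theorem pv_map_zip_self {α σ : Type} (l : List α) (g : α → σ) :
    (l.map g).zip l = l.map (fun r => (g r, r)) := by
  induction l with
  | nil => rfl
  | cons x xs ih => simp [ih]

theorem pv_zip_map_self {α σ : Type} (l : List α) (g : α → σ) :
    l.zip (l.map g) = l.map (fun r => (r, g r)) := by
  induction l with
  | nil => rfl
  | cons x xs ih => simp [ih]

-- Loop interchange: folding the seed list while mapping a per-reference step over a
-- state list (B's shape) equals mapping the per-reference fold over the references (A's shape).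
theorem pv_fold_map_exchange {α β σ : Type} (f : σ → β → α → σ) (l : List α)
    (refs : List β) (g : β → σ) :
    l.foldl (fun sts x => (sts.zip refs).map (fun p => f p.1 p.2 x)) (refs.map g)
      = refs.map (fun r => l.foldl (fun s x => f s r x) (g r)) := by
  induction l generalizing g with
  | nil => simp
  | cons x xs ih =>
    simp only [List.foldl_cons]
    rw [pv_map_zip_self refs g, List.map_map]
    exact ih (fun r => f (g r) r x)

-- One seed step: A's 3-tuple update projects to B's 2-tuple update (A's three guards
-- collapse to B's single window-and-strictly-closer condition).
theorem pv_step_agree (window ref_pos : Int) (st : Option Int × Int × Int)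
    (sc : Int × Int × Int × String) :
    ((pvStepA window ref_pos st sc).1, (pvStepA window ref_pos st sc).2.1)
      = pvStepB window ref_pos (st.1, st.2.1) sc := by
  unfold pvStepA pvStepB
  rcases abs_cases (sc.2.1 - ref_pos) with ⟨ha, hs⟩ | ⟨ha, hs⟩ <;>
    rw [ha] <;> split_ifs <;> first | rfl | omega

-- Whole inner fold: A's per-reference scan projects to B's per-reference state fold.
theorem pv_fold_agree (window ref_pos : Int) (seeds : List (Int × Int × Int × String))
    (st : Option Int × Int × Int) :
    ((seeds.foldl (pvStepA window ref_pos) st).1, (seeds.foldl (pvStepA window ref_pos) st).2.1)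
      = seeds.foldl (pvStepB window ref_pos) (st.1, st.2.1) := by
  induction seeds generalizing st with
  | nil => rfl
  | cons sc rest ih =>
    simp only [List.foldl_cons]
    rw [ih, pv_step_agree]

-- Per-reference dict-update bodies agree, given the per-reference folds agree.
theorem pv_body_agree (window : Int) (seeds : List (Int × Int × Int × String))
    (hr : Int × Int × Int) (ms : PySem.Dict Int (Int × Int × Int)) :
    (match seeds.foldl (pvStepA window hr.2.2) (none, window * 2, -1) with
     | (some bs, bd, _) => ms.insert hr.1 (bs, hr.2.1, bd)
     | (none, _, _) => ms)
      = (match (seeds.foldl (pvStepB window hr.2.2) (none, window * 2)).1 with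
         | some bs => ms.insert hr.1 (bs, hr.2.1, (seeds.foldl (pvStepB window hr.2.2) (none, window * 2)).2)
         | none => ms) := by
  have h := pv_fold_agree window hr.2.2 seeds (none, window * 2, -1)
  dsimp only at h
  rw [← h]
  cases h3 : seeds.foldl (pvStepA window hr.2.2) (none, window * 2, -1) with
  | mk bso rest =>
    cases rest with
    | mk bd bp => cases bso <;> rfl

-- The whole program, stated over the proof-only step names (definitionally the two ports).
theorem pv_main (hex_refs : List (Int × Int × Int)) (seed_candidates : List (Int × Int × Int × String))
    (window : Int) :
    (hex_refs.foldl
      (fun (ms : PySem.Dict Int (Int × Int × Int)) (hr : Int × Int × Int) =>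
        match seed_candidates.foldl (pvStepA window hr.2.2) (none, window * 2, -1) with
        | (some bs, bd, _) => ms.insert hr.1 (bs, hr.2.1, bd)
        | (none, _, _) => ms)
      PySem.Dict.empty).items
      = ((hex_refs.zip
            (seed_candidates.foldl
              (fun (states : List (Option Int × Int)) sc =>
                (states.zip hex_refs).map (fun p => pvStepB window p.2.2.2 p.1 sc))
              (hex_refs.map (fun _ => (none, window * 2))))).foldl
          (fun (ms : PySem.Dict Int (Int × Int × Int)) p =>
            match p.2.1 with
            | some bs => ms.insert p.1.1 (bs, p.1.2.1, p.2.2)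
            | none => ms)
          PySem.Dict.empty).items := by
  rw [pv_fold_map_exchange (fun s (r : Int × Int × Int) sc => pvStepB window r.2.2 s sc)
        seed_candidates hex_refs (fun _ => ((none : Option Int), window * 2))]
  rw [pv_zip_map_self hex_refs, List.foldl_map]
  congr 1
  apply List.foldl_ext
  intro ms hr _
  exact pv_body_agree window seed_candidates hr ms

-- ===== VERDICT (by name: the statement is the Claim_ definition above) =====
theorem match_refs_to_seeds_spec : Claim_equal_match_refs_to_seeds := by
  intro hex_refs seed_candidates text window _
  show match_refs_to_seeds hex_refs seed_candidates text window
      = match_refs_to_seeds_alt hex_refs seed_candidates text window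
  exact pv_main hex_refs seed_candidates window
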